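-- pv_equiv track=rewrite | github.com/Baymax-Fools/ctf_crypto_exp.py | AES/111.py | base64_stego_decode
-- ===== SOURCE A (Python) =====
-- def base64_stego_decode(lines):
--     bin_str = ''
--     for line in lines:
--         line = line.strip()
--         if not line:
--             continue
--         padding_count = line.count('=')
--         if padding_count > 0:
--             # 获取最后一个非=的字符
--             last_char = line[-padding_count-1]
--             # 该字符在Base64表中的索引（6位）
--             index = "ABCDEFGHIJKLMNOPQRSTUVWXYZabcdefghijklmnopqrstuvwxyz0123456789+/".index(last_char)
--             # 取最后 padding_count*2 位
--             if padding_count == 1: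
--                 # 取最后2位
--                 bits = bin(index)[2:].zfill(6)[-2:]
--                 bin_str += bits
--             elif padding_count == 2:
--                 # 取最后4位
--                 bits = bin(index)[2:].zfill(6)[-4:]
--                 bin_str += bits
--             # 如果padding_count更多，按实际隐藏位数处理，但标准Base64最多2个=
--     # 将二进制串转字节
--     message = ''
--     for i in range(0, len(bin_str), 8):
--         byte = bin_str[i:i+8]
--         if len(byte) == 8:
--             message += chr(int(byte, 2))
--     return message
-- ===== SOURCE B (Python) =====
-- B64_TABLE = "ABCDEFGHIJKLMNOPQRSTUVWXYZabcdefghijklmnopqrstuvwxyz0123456789+/"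
--
-- def base64_stego_decode(lines):
--     # Streaming: keep a numeric bit buffer and emit bytes as soon as 8 bits are available.
--     message = []
--     buf = []
--     for line in lines:
--         s = line.strip()
--         if not s:
--             continue
--         c = s.count('=')
--         if c > 0:
--             ch = s[-c - 1]
--             idx = B64_TABLE.index(ch)
--             if c == 1:
--                 buf.extend([(idx >> 1) & 1, idx & 1])
--             elif c == 2:
--                 buf.extend([(idx >> 3) & 1, (idx >> 2) & 1, (idx >> 1) & 1, idx & 1])
--             while len(buf) >= 8:
--                 byte = 0
--                 for b in buf[:8]:
--                     byte = byte * 2 + b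
--                 message.append(chr(byte))
--                 del buf[:8]
--     return ''.join(message)
-- ===== Notes on version B (the rewrite author's own statement) =====
-- stated objective: alternative
-- what changed: A builds the complete bit string in one pass and then chunks it into 8-bit bytes in a second pass; B does a single streaming pass that maintains a numeric bit buffer (2 or 4 bits pushed per padded line) and emits a byte arithmetically as soon as 8 bits are buffered, discarding the final partial byte.
import Mathlib
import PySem

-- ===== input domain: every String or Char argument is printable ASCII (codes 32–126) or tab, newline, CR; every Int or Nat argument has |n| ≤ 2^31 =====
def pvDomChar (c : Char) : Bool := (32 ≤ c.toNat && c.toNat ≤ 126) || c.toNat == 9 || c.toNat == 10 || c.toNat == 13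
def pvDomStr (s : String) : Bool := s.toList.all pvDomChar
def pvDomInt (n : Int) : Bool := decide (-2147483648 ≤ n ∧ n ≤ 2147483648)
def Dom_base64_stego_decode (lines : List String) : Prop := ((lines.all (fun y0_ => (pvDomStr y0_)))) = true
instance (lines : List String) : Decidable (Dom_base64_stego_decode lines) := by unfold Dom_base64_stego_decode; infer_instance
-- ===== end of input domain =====

-- B replaces A's two-phase pass (build the whole bit string, then chunk it into bytes) by one
-- streaming pass over the lines that maintains a numeric bit buffer and emits a byte as soon as
-- 8 bits are available (objective: alternative decomposition, same cost).

-- ===== PORT A =====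
def pvTableA : List Char := "ABCDEFGHIJKLMNOPQRSTUVWXYZabcdefghijklmnopqrstuvwxyz0123456789+/".toList

-- one iteration of A's first loop (bin_str accumulation)
def pvStepA (bin_str : List Char) (line : String) : List Char :=
  let l := PySem.Chars.strip line.toList
  if l = [] then bin_str
  else
    let c := PySem.Chars.count l ['=']
    if 0 < c then
      match PySem.List.pyGet? l (-(c : Int) - 1) with
      | none => bin_str  -- Python raises IndexError here; excluded by Pre_
      | some lastChar =>
        let f := PySem.Chars.find pvTableA [lastChar]
        if f = -1 then bin_str  -- Python's .index raises ValueError here; excluded by Pre_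
        else
          let index := f.toNat
          if c = 1 then
            bin_str ++ PySem.List.slice (PySem.Chars.zfill (PySem.List.slice (PySem.Int.toBinChars0b (index : Int)) (some 2) none) 6) (some (-2)) none
          else if c = 2 then
            bin_str ++ PySem.List.slice (PySem.Chars.zfill (PySem.List.slice (PySem.Int.toBinChars0b (index : Int)) (some 2) none) 6) (some (-4)) none
          else bin_str
    else bin_str

def base64_stego_decode (lines : List String) : String :=
  let bin_str := lines.foldl pvStepA []
  let message := (PySem.List.pyRange 0 (bin_str.length : Int) 8).foldl
    (fun message i =>
      let byte := PySem.List.slice bin_str (some i) (some (i + 8))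
      if byte.length = 8 then
        match PySem.Int.ofCharsBase? byte 2 with
        | some v => message ++ [Char.ofNat v.toNat]
        | none => message  -- unreachable: byte consists of '0'/'1' only
      else message)
    []
  String.ofList message

-- ===== PORT B =====
def pvTableB : List Char := "ABCDEFGHIJKLMNOPQRSTUVWXYZabcdefghijklmnopqrstuvwxyz0123456789+/".toList

def pvBitsB (idx : Nat) (c : Nat) : List Nat :=
  if c = 1 then [(idx >>> 1) &&& 1, idx &&& 1]
  else if c = 2 then [(idx >>> 3) &&& 1, (idx >>> 2) &&& 1, (idx >>> 1) &&& 1, idx &&& 1]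
  else []

-- B's inner `while len(buf) >= 8` drain loop
def pvDrainB (message : List Char) (buf : List Nat) : List Char × List Nat :=
  if _h : 8 ≤ buf.length then
    pvDrainB (message ++ [Char.ofNat ((buf.take 8).foldl (fun a b => a * 2 + b) 0)]) (buf.drop 8)
  else (message, buf)
termination_by buf.length
decreasing_by simp; omega

def pvStepB (st : List Char × List Nat) (line : String) : List Char × List Nat :=
  let s := PySem.Chars.strip line.toList
  if s = [] then st
  else
    let c := PySem.Chars.count s ['=']
    if 0 < c then
      match PySem.List.pyGet? s (-(c : Int) - 1) with
      | none => st
      | some ch =>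
        let f := PySem.Chars.find pvTableB [ch]
        if f = -1 then st
        else pvDrainB st.1 (st.2 ++ pvBitsB f.toNat c)
    else st

def base64_stego_decode_alt (lines : List String) : String :=
  String.ofList (lines.foldl pvStepB (([], []) : List Char × List Nat)).1

-- ===== PRECONDITION & SPEC =====
-- Pre_ excludes exactly the inputs where Python A raises: a stripped line whose '='-count c > 0
-- but which has no character at position -c-1 (IndexError) or whose character there is not in
-- the base64 table (ValueError from .index).
def Pre_base64_stego_decode (lines : List String) : Prop :=
  ∀ line ∈ lines,
    let s := PySem.Chars.strip line.toList
    let c := PySem.Chars.count s ['=']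
    0 < c → c + 1 ≤ s.length ∧
      s.getD (s.length - c - 1) ' ' ∈ "ABCDEFGHIJKLMNOPQRSTUVWXYZabcdefghijklmnopqrstuvwxyz0123456789+/".toList
instance (lines : List String) : Decidable (Pre_base64_stego_decode lines) := by
  unfold Pre_base64_stego_decode; infer_instance

def pvWitness_base64_stego_decode : List String := ["aGk=", "", "QQ==", "Zm9vYmFy"]

def Spec_base64_stego_decode (lines : List String) (out : String) : Prop := out = base64_stego_decode_alt lines
instance (lines : List String) (out : String) : Decidable (Spec_base64_stego_decode lines out) := by
  unfold Spec_base64_stego_decode; infer_instance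

-- ===== CLAIM (what is proved, stated in full; the proofs are below) =====
def Claim_equal_base64_stego_decode : Prop := ∀ (lines : List String), Dom_base64_stego_decode lines → Pre_base64_stego_decode lines → Spec_base64_stego_decode lines (base64_stego_decode lines)

-- ===== LEMMAS AND PROOFS =====

theorem pvWitness_ok :
    Dom_base64_stego_decode pvWitness_base64_stego_decode ∧
    Pre_base64_stego_decode pvWitness_base64_stego_decode := by decide

def pvBitChar (b : Nat) : Char := if b = 1 then '1' else '0'

-- the bits one line contributes (B's numeric view; [] on A's skip/raise branches)
def pvLineBits (line : String) : List Nat :=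
  let s := PySem.Chars.strip line.toList
  if s = [] then []
  else
    let c := PySem.Chars.count s ['=']
    if 0 < c then
      match PySem.List.pyGet? s (-(c : Int) - 1) with
      | none => []
      | some ch =>
        let f := PySem.Chars.find pvTableA [ch]
        if f = -1 then [] else pvBitsB f.toNat c
    else []

def pvBytes (bs : List Nat) : List Char :=
  if 8 ≤ bs.length then
    Char.ofNat ((bs.take 8).foldl (fun a b => a * 2 + b) 0) :: pvBytes (bs.drop 8)
  else []
termination_by bs.length
decreasing_by simp; omega

def pvRest (bs : List Nat) : List Nat :=
  if 8 ≤ bs.length then pvRest (bs.drop 8) else bs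
termination_by bs.length
decreasing_by simp; omega

theorem pvBits_c1 : ∀ idx : Nat, idx < 65 →
    PySem.List.slice (PySem.Chars.zfill (PySem.List.slice (PySem.Int.toBinChars0b (idx : Int)) (some 2) none) 6) (some (-2)) none
      = (pvBitsB idx 1).map pvBitChar := by decide

theorem pvBits_c2 : ∀ idx : Nat, idx < 65 →
    PySem.List.slice (PySem.Chars.zfill (PySem.List.slice (PySem.Int.toBinChars0b (idx : Int)) (some 2) none) 6) (some (-4)) none
      = (pvBitsB idx 2).map pvBitChar := by decide

theorem pvStepA_eq (bin : List Char) (line : String) :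
    pvStepA bin line = bin ++ (pvLineBits line).map pvBitChar := by
  unfold pvStepA pvLineBits
  by_cases h1 : PySem.Chars.strip line.toList = []
  · simp [h1]
  · simp only [if_neg h1]
    by_cases h2 : 0 < PySem.Chars.count (PySem.Chars.strip line.toList) ['=']
    · simp only [if_pos h2]
      cases hg : PySem.List.pyGet? (PySem.Chars.strip line.toList)
          (-(PySem.Chars.count (PySem.Chars.strip line.toList) ['='] : Int) - 1) with
      | none => simp
      | some ch =>
        by_cases h3 : PySem.Chars.find pvTableA [ch] = -1
        · simp [h3]
        · simp only [if_neg h3]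
          have hidx : (PySem.Chars.find pvTableA [ch]).toNat < 65 := by
            have h64 : pvTableA.length = 64 := by decide
            have := PySem.Chars.find_le_length pvTableA [ch]
            rw [h64] at this
            omega
          by_cases h4 : PySem.Chars.count (PySem.Chars.strip line.toList) ['='] = 1
          · simp [h4]
            rw [← Int.toNat_eq_max]
            exact pvBits_c1 _ hidx
          · by_cases h5 : PySem.Chars.count (PySem.Chars.strip line.toList) ['='] = 2
            · simp [h5]
              rw [← Int.toNat_eq_max]
              exact pvBits_c2 _ hidx
            · simp [h4, h5, pvBitsB]
    · simp [h2]

theorem pvFoldA (lines : List String) :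
    lines.foldl pvStepA [] = (lines.flatMap pvLineBits).map pvBitChar := by
  rw [show pvStepA = fun b l => b ++ (pvLineBits l).map pvBitChar from funext fun b => funext fun l => pvStepA_eq b l]
  rw [PySem.List.foldl_append_eq_flatMap]
  simp [List.map_flatMap]

theorem pvDrain_eq (msg : List Char) (buf : List Nat) :
    pvDrainB msg buf = (msg ++ pvBytes buf, pvRest buf) := by
  fun_induction pvDrainB msg buf with
  | case1 msg buf h ih =>
    rw [pvBytes, pvRest, if_pos h, if_pos h, ih]
    simp
  | case2 msg buf h =>
    rw [pvBytes, pvRest, if_neg h, if_neg h]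
    simp

theorem pvRest_lt (bs : List Nat) : (pvRest bs).length < 8 := by
  fun_induction pvRest bs with
  | case1 bs h ih => exact ih
  | case2 bs h => omega

theorem pvBytes_small (bs : List Nat) (h : bs.length < 8) : pvBytes bs = [] := by
  rw [pvBytes]; simp [Nat.not_le.2 h]

theorem pvRest_small (bs : List Nat) (h : bs.length < 8) : pvRest bs = bs := by
  rw [pvRest]; simp [Nat.not_le.2 h]

theorem pvAppend_aux : ∀ (n : Nat) (bs : List Nat), bs.length ≤ n → ∀ t : List Nat,
    pvBytes (bs ++ t) = pvBytes bs ++ pvBytes (pvRest bs ++ t) ∧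
    pvRest (bs ++ t) = pvRest (pvRest bs ++ t) := by
  intro n
  induction n with
  | zero =>
    intro bs hn t
    have : bs = [] := List.eq_nil_of_length_eq_zero (by omega)
    subst this
    simp [pvRest_small, pvBytes_small]
  | succ n ih =>
    intro bs hn t
    by_cases h : 8 ≤ bs.length
    · have h1 : pvBytes bs = Char.ofNat ((bs.take 8).foldl (fun a b => a * 2 + b) 0) :: pvBytes (bs.drop 8) := by
        rw [pvBytes, if_pos h]
      have h2 : pvRest bs = pvRest (bs.drop 8) := by rw [pvRest, if_pos h]
      have h3 : 8 ≤ (bs ++ t).length := by simp; omega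
      have h4 : (bs ++ t).take 8 = bs.take 8 := List.take_append_of_le_length h
      have h5 : (bs ++ t).drop 8 = bs.drop 8 ++ t := List.drop_append_of_le_length h
      have h6 : (bs.drop 8).length ≤ n := by simp; omega
      obtain ⟨ihb, ihr⟩ := ih (bs.drop 8) h6 t
      constructor
      · rw [pvBytes, if_pos h3, h4, h5, ihb, h1, h2]
        simp
      · rw [pvRest, if_pos h3, h5, ihr, h2]
    · simp [pvBytes_small bs (by omega), pvRest_small bs (by omega)]

theorem pvBytes_append (bs t : List Nat) :
    pvBytes (bs ++ t) = pvBytes bs ++ pvBytes (pvRest bs ++ t) :=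
  (pvAppend_aux bs.length bs le_rfl t).1

theorem pvRest_append (bs t : List Nat) :
    pvRest (bs ++ t) = pvRest (pvRest bs ++ t) :=
  (pvAppend_aux bs.length bs le_rfl t).2

theorem pvStepB_eq (msg : List Char) (buf : List Nat) (h : buf.length < 8) (line : String) :
    pvStepB (msg, buf) line
      = (msg ++ pvBytes (buf ++ pvLineBits line), pvRest (buf ++ pvLineBits line)) := by
  have hskip : (msg, buf) = (msg ++ pvBytes buf, pvRest buf) := by
    rw [pvBytes_small buf h, pvRest_small buf h]; simp
  have htab : pvTableB = pvTableA := rfl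
  unfold pvStepB pvLineBits
  rw [htab]
  by_cases h1 : PySem.Chars.strip line.toList = []
  · simpa [h1] using hskip
  · simp only [if_neg h1]
    by_cases h2 : 0 < PySem.Chars.count (PySem.Chars.strip line.toList) ['=']
    · simp only [if_pos h2]
      cases hg : PySem.List.pyGet? (PySem.Chars.strip line.toList)
          (-(PySem.Chars.count (PySem.Chars.strip line.toList) ['='] : Int) - 1) with
      | none => simpa using hskip
      | some ch =>
        by_cases h3 : PySem.Chars.find pvTableA [ch] = -1
        · simpa [h3] using hskip
        · simp only [if_neg h3]
          rw [pvDrain_eq]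
    · simpa [h2] using hskip

theorem pvFoldB (lines : List String) (msg : List Char) (buf : List Nat) (h : buf.length < 8) :
    lines.foldl pvStepB (msg, buf)
      = (msg ++ pvBytes (buf ++ lines.flatMap pvLineBits), pvRest (buf ++ lines.flatMap pvLineBits)) := by
  induction lines generalizing msg buf with
  | nil => simp [pvBytes_small buf h, pvRest_small buf h]
  | cons line ls ih =>
    rw [List.foldl_cons, pvStepB_eq msg buf h line,
      ih _ _ (pvRest_lt (buf ++ pvLineBits line))]
    rw [List.flatMap_cons, ← List.append_assoc, pvBytes_append (buf ++ pvLineBits line),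
      pvRest_append (buf ++ pvLineBits line)]
    simp

theorem pvBitsB_lt (idx c : Nat) : ∀ b ∈ pvBitsB idx c, b < 2 := by
  intro b hb
  have hand : ∀ x : Nat, x &&& 1 < 2 := fun x => lt_of_le_of_lt Nat.and_le_right (by norm_num)
  unfold pvBitsB at hb
  split_ifs at hb
  · simp at hb; rcases hb with h | h <;> subst h <;> omega
  · simp at hb; rcases hb with h | h | h | h <;> subst h <;> omega
  · simp at hb

theorem pvLineBits_lt (line : String) : ∀ b ∈ pvLineBits line, b < 2 := by
  intro b hb
  unfold pvLineBits at hb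
  by_cases h1 : PySem.Chars.strip line.toList = []
  · simp [h1] at hb
  · simp only [if_neg h1] at hb
    by_cases h2 : 0 < PySem.Chars.count (PySem.Chars.strip line.toList) ['=']
    · simp only [if_pos h2] at hb
      cases hg : PySem.List.pyGet? (PySem.Chars.strip line.toList)
          (-(PySem.Chars.count (PySem.Chars.strip line.toList) ['='] : Int) - 1) with
      | none => rw [hg] at hb; simp at hb
      | some ch =>
        rw [hg] at hb
        by_cases h3 : PySem.Chars.find pvTableA [ch] = -1
        · simp [h3] at hb
        · simp only [if_neg h3] at hb
          exact pvBitsB_lt _ _ b hb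
    · simp [h2] at hb

theorem pvByteTable : ∀ b1 ∈ [0,1], ∀ b2 ∈ [0,1], ∀ b3 ∈ [0,1], ∀ b4 ∈ [0,1], ∀ b5 ∈ [0,1], ∀ b6 ∈ [0,1], ∀ b7 ∈ [0,1], ∀ b8 ∈ [0,1],
    PySem.Int.ofCharsBase? (([b1,b2,b3,b4,b5,b6,b7,b8] : List Nat).map pvBitChar) 2
      = some ((([b1,b2,b3,b4,b5,b6,b7,b8] : List Nat).foldl (fun a b => a * 2 + b) 0 : Nat) : Int) := by
  decide

theorem pvByte8 (bs : List Nat) (hl : bs.length = 8) (hb : ∀ b ∈ bs, b < 2) :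
    PySem.Int.ofCharsBase? (bs.map pvBitChar) 2
      = some ((bs.foldl (fun a b => a * 2 + b) 0 : Nat) : Int) := by
  match bs, hl with
  | [b1,b2,b3,b4,b5,b6,b7,b8], _ =>
    have h1 : b1 < 2 := hb b1 (by simp)
    have h2 : b2 < 2 := hb b2 (by simp)
    have h3 : b3 < 2 := hb b3 (by simp)
    have h4 : b4 < 2 := hb b4 (by simp)
    have h5 : b5 < 2 := hb b5 (by simp)
    have h6 : b6 < 2 := hb b6 (by simp)
    have h7 : b7 < 2 := hb b7 (by simp)
    have h8 : b8 < 2 := hb b8 (by simp)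
    exact pvByteTable b1 (by simp; omega) b2 (by simp; omega) b3 (by simp; omega)
      b4 (by simp; omega) b5 (by simp; omega) b6 (by simp; omega)
      b7 (by simp; omega) b8 (by simp; omega)

theorem pvRange8_cons (a b : Int) (h : a < b) :
    PySem.List.pyRange a b 8 = a :: PySem.List.pyRange (a + 8) b 8 := by
  rw [PySem.List.pyRange_of_pos a b (by norm_num), PySem.List.pyRange_of_pos (a + 8) b (by norm_num)]
  have hc : ((b - a + 8 - 1) / 8).toNat
      = (if a + 8 < b then ((b - (a + 8) + 8 - 1) / 8).toNat else 0) + 1 := by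
    split_ifs with h2 <;> omega
  rw [if_pos h, hc, List.range_succ_eq_map, List.map_cons, List.map_map]
  congr 1
  · push_cast; ring_nf
  · apply List.map_congr_left
    intro k _
    simp [Nat.succ_eq_add_one]
    ring

theorem pvRange8_nil (a b : Int) (h : b ≤ a) : PySem.List.pyRange a b 8 = [] := by
  rw [PySem.List.pyRange_of_pos a b (by norm_num), if_neg (by omega)]
  simp

theorem pvChunk (n : Nat) (bs : List Nat) (hb : ∀ b ∈ bs, b < 2) :
    ∀ j : Nat, bs.length - j ≤ n → j ≤ bs.length → ∀ msg : List Char,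
    (PySem.List.pyRange (j : Int) (((bs.map pvBitChar).length : Nat) : Int) 8).foldl
      (fun message i =>
        let byte := PySem.List.slice (bs.map pvBitChar) (some i) (some (i + 8))
        if byte.length = 8 then
          match PySem.Int.ofCharsBase? byte 2 with
          | some v => message ++ [Char.ofNat v.toNat]
          | none => message
        else message)
      msg
      = msg ++ pvBytes (bs.drop j) := by
  have base : ∀ j : Nat, bs.length ≤ j → ∀ msg : List Char,
      (PySem.List.pyRange (j : Int) (((bs.map pvBitChar).length : Nat) : Int) 8).foldl
        (fun message i =>
          let byte := PySem.List.slice (bs.map pvBitChar) (some i) (some (i + 8))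
          if byte.length = 8 then
            match PySem.Int.ofCharsBase? byte 2 with
            | some v => message ++ [Char.ofNat v.toNat]
            | none => message
          else message)
        msg
        = msg ++ pvBytes (bs.drop j) := by
    intro j hj msg
    rw [pvRange8_nil _ _ (by rw [List.length_map]; exact_mod_cast hj)]
    rw [List.drop_eq_nil_of_le hj, pvBytes_small [] (by simp)]
    simp
  induction n with
  | zero =>
    intro j h1 h2 msg
    exact base j (by omega) msg
  | succ n ih =>
    intro j h1 h2 msg
    by_cases hj : bs.length ≤ j
    · exact base j hj msg
    · have hjl : j < bs.length := by omega
      rw [pvRange8_cons _ _ (by rw [List.length_map]; exact_mod_cast hjl), List.foldl_cons]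
      simp only
      rw [show ((j : Int) + 8) = ((j : Int) + ((8 : Nat) : Int)) from by norm_num,
        PySem.List.slice_natCast_add, ← List.map_drop, ← List.map_take]
      by_cases hcase : 8 ≤ bs.length - j
      · have hlen : (((bs.drop j).take 8).map pvBitChar).length = 8 := by
          simp [List.length_take, List.length_drop]; omega
        rw [if_pos hlen]
        rw [pvByte8 ((bs.drop j).take 8) (by simp [List.length_take, List.length_drop]; omega)
          (fun b hb' => hb b (List.mem_of_mem_drop (List.mem_of_mem_take hb')))]
        simp only [Int.toNat_natCast]
        rw [show ((j : Int) + ((8 : Nat) : Int)) = ((j + 8 : Nat) : Int) from by push_cast; ring]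
        rw [ih (j + 8) (by omega) (by omega) _]
        conv_rhs => rw [pvBytes]
        rw [if_pos (by simp [List.length_drop]; omega), List.drop_drop]
        simp
      · have hlen : ¬ ((((bs.drop j).take 8).map pvBitChar).length = 8) := by
          simp [List.length_take, List.length_drop]; omega
        rw [if_neg hlen]
        rw [show ((j : Int) + ((8 : Nat) : Int)) = ((j + 8 : Nat) : Int) from by push_cast; ring]
        rw [pvRange8_nil _ _ (by rw [List.length_map]; push_cast; omega)]
        rw [pvBytes_small (bs.drop j) (by simp [List.length_drop]; omega)]
        simp

-- ===== VERDICT (by name: the statement is the Claim_ definition above) =====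
theorem base64_stego_decode_spec : Claim_equal_base64_stego_decode := by
  unfold Claim_equal_base64_stego_decode
  intro lines _ _
  unfold Spec_base64_stego_decode
  simp only [base64_stego_decode, base64_stego_decode_alt]
  rw [pvFoldA, pvFoldB lines [] [] (by norm_num)]
  have hb : ∀ b ∈ lines.flatMap pvLineBits, b < 2 := by
    intro b hbm
    obtain ⟨l, hl, hbl⟩ := List.mem_flatMap.1 hbm
    exact pvLineBits_lt l b hbl
  rw [show (0 : Int) = ((0 : Nat) : Int) from by norm_num]
  rw [pvChunk (lines.flatMap pvLineBits).length (lines.flatMap pvLineBits) hb 0 (by omega)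
    (by omega) []]
  simp
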